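-- pv_equiv track=rewrite | github.com/Francis-zyw/AI | pipeline_v2/step2_v2.py | select_indexed_items
-- ===== SOURCE A (Python) =====
-- from typing import Any, Dict, List, Sequence
--
-- def select_indexed_items(
--     items: Sequence[Any],
--     start_index: int = 1,
--     limit: int | None = None,
-- ) -> List[tuple[int, Any]]:
--     normalized_start_index = max(1, int(start_index or 1))
--     normalized_limit = None if limit is None else max(0, int(limit))
--     selected: List[tuple[int, Any]] = []
--     for absolute_index, item in enumerate(items, start=1):
--         if absolute_index < normalized_start_index:
--             continue
--         if normalized_limit is not None and len(selected) >= normalized_limit: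
--             break
--         selected.append((absolute_index, item))
--     return selected
-- ===== SOURCE B (Python) =====
-- def select_indexed_items(items, start_index=1, limit=None):
--     start = max(1, int(start_index or 1))
--     if limit is None:
--         window = items[start - 1:]
--     else:
--         window = items[start - 1:start - 1 + max(0, int(limit))]
--     return list(enumerate(window, start=start))
-- ===== Notes on version B (the rewrite author's own statement) =====
-- stated objective: simpler
-- what changed: Replaces the scan-and-continue loop with break by slice arithmetic (compute the window items[start-1 : start-1+limit] directly) plus a single enumerate, removing the accumulator and both conditionals.
import Mathlib
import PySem

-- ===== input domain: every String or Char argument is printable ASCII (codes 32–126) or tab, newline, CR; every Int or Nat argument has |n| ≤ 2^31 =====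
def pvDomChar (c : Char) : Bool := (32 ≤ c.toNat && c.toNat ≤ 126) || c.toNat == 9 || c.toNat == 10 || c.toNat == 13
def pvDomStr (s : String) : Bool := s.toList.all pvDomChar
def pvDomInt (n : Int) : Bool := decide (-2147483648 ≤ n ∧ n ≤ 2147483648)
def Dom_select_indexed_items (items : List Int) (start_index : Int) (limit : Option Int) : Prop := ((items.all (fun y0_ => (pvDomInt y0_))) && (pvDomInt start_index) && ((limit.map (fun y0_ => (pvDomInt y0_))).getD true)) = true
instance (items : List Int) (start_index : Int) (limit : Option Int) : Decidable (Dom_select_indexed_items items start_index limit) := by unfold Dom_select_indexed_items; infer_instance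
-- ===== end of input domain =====

-- B replaces A's scan-and-continue loop by slice arithmetic + enumerate (objective: simpler).
-- ===== PORT A =====
def pvLoopA (ns : Int) (nl : Option Int) : List (Int × Int) → List (Int × Int) → List (Int × Int)
  | acc, [] => acc
  | acc, (i, x) :: rest =>
    if i < ns then pvLoopA ns nl acc rest
    else if (match nl with | some l => decide (l ≤ (acc.length : Int)) | none => false) then acc
    else pvLoopA ns nl (acc ++ [(i, x)]) rest

def select_indexed_items (items : List Int) (start_index : Int) (limit : Option Int) : List (Int × Int) :=
  let ns := max 1 (if start_index = 0 then 1 else start_index)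
  let nl := limit.map (fun l => max 0 l)
  pvLoopA ns nl [] (PySem.List.enumerate items 1)

-- ===== PORT B =====
def select_indexed_items_alt (items : List Int) (start_index : Int) (limit : Option Int) : List (Int × Int) :=
  let start := max 1 (if start_index = 0 then 1 else start_index)
  let window := match limit with
    | none => PySem.List.slice items (some (start - 1)) none
    | some l => PySem.List.slice items (some (start - 1)) (some (start - 1 + max 0 l))
  PySem.List.enumerate window start

-- ===== PRECONDITION & SPEC =====
def Spec_select_indexed_items (items : List Int) (start_index : Int) (limit : Option Int) (out : List (Int × Int)) : Prop := out = select_indexed_items_alt items start_index limit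
instance (items : List Int) (start_index : Int) (limit : Option Int) (out : List (Int × Int)) : Decidable (Spec_select_indexed_items items start_index limit out) := by unfold Spec_select_indexed_items; infer_instance

-- ===== CLAIM (what is proved, stated in full; the proofs are below) =====
def Claim_equal_select_indexed_items : Prop := ∀ (items : List Int) (start_index : Int) (limit : Option Int), Dom_select_indexed_items items start_index limit → Spec_select_indexed_items items start_index limit (select_indexed_items items start_index limit)

-- ===== LEMMAS AND PROOFS =====
def pvCap (o : Option Int) (l : List (Int × Int)) : List (Int × Int) :=
  match o with
  | none => l
  | some k => l.take k.toNat

lemma pvLoopA_char (ns : Int) (nl : Option Int) :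
    ∀ (xs : List Int) (i : Int) (acc : List (Int × Int)),
      pvLoopA ns nl acc (PySem.List.enumerate xs i) =
        acc ++ pvCap (nl.map (fun l => l - acc.length))
          ((PySem.List.enumerate xs i).drop (ns - i).toNat) := by
  intro xs
  induction xs with
  | nil => intro i acc; cases nl <;> simp [pvLoopA, pvCap, PySem.List.enumerate]
  | cons x xs ih =>
    intro i acc
    rw [PySem.List.enumerate_cons]
    by_cases hlt : i < ns
    · have hdrop : (ns - i).toNat = ((ns - (i+1)).toNat) + 1 := by omega
      rw [show pvLoopA ns nl acc ((i, x) :: PySem.List.enumerate xs (i+1)) =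
        pvLoopA ns nl acc (PySem.List.enumerate xs (i+1)) from by simp [pvLoopA, hlt]]
      rw [ih (i+1) acc, hdrop]
      simp
    · have hdrop : (ns - i).toNat = 0 := by omega
      rw [hdrop]
      cases nl with
      | none =>
        rw [show pvLoopA ns none acc ((i, x) :: PySem.List.enumerate xs (i+1)) =
          pvLoopA ns none (acc ++ [(i, x)]) (PySem.List.enumerate xs (i+1)) from by
            simp [pvLoopA, hlt]]
        rw [ih (i+1) (acc ++ [(i, x)])]
        have hd1 : (ns - (i+1)).toNat = 0 := by omega
        simp [pvCap, hd1]
      | some l =>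
        by_cases hle : l ≤ (acc.length : Int)
        · rw [show pvLoopA ns (some l) acc ((i, x) :: PySem.List.enumerate xs (i+1)) = acc from by
            simp [pvLoopA, hlt, hle]]
          have : (l - (acc.length : Int)).toNat = 0 := by omega
          simp [pvCap, this]
        · rw [show pvLoopA ns (some l) acc ((i, x) :: PySem.List.enumerate xs (i+1)) =
            pvLoopA ns (some l) (acc ++ [(i, x)]) (PySem.List.enumerate xs (i+1)) from by
              simp [pvLoopA, hlt, hle]]
          rw [ih (i+1) (acc ++ [(i, x)])]
          have hd1 : (ns - (i+1)).toNat = 0 := by omega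
          have htk : (l - (acc.length : Int)).toNat = ((l - ((acc.length : Int)+1)).toNat) + 1 := by omega
          simp [pvCap, hd1, htk]

lemma enumerate_drop (xs : List Int) : ∀ (n : Nat) (i : Int),
    (PySem.List.enumerate xs i).drop n = PySem.List.enumerate (xs.drop n) (i + n) := by
  induction xs with
  | nil => intro n i; simp [PySem.List.enumerate]
  | cons x xs ih =>
    intro n i
    cases n with
    | zero => simp
    | succ m =>
      rw [PySem.List.enumerate_cons]
      simp only [List.drop_succ_cons, ih m (i+1)]
      congr 1
      push_cast; ring

lemma enumerate_take (xs : List Int) : ∀ (n : Nat) (i : Int),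
    (PySem.List.enumerate xs i).take n = PySem.List.enumerate (xs.take n) i := by
  induction xs with
  | nil => intro n i; simp [PySem.List.enumerate]
  | cons x xs ih =>
    intro n i
    cases n with
    | zero => simp [PySem.List.enumerate]
    | succ m =>
      rw [PySem.List.enumerate_cons, List.take_succ_cons, List.take_succ_cons,
        PySem.List.enumerate_cons, ih m (i+1)]

-- ===== VERDICT (by name: the statement is the Claim_ definition above) =====
theorem select_indexed_items_spec : Claim_equal_select_indexed_items := by
  intro items start_index limit _
  unfold Spec_select_indexed_items select_indexed_items select_indexed_items_alt
  set ns := max 1 (if start_index = 0 then 1 else start_index) with hns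
  have hns1 : 1 ≤ ns := le_max_left _ _
  rw [pvLoopA_char]
  have hj : ns - 1 = (((ns - 1).toNat : Nat) : Int) := by omega
  have hdrop : (PySem.List.enumerate items 1).drop (ns - 1).toNat =
      PySem.List.enumerate (items.drop (ns - 1).toNat) ns := by
    rw [enumerate_drop]; congr 1; omega
  cases limit with
  | none =>
    simp only [Option.map_none, pvCap, List.nil_append, hdrop]
    rw [hj, PySem.List.slice_from_natCast]
    simp
  | some l =>
    simp only [Option.map_some, pvCap, List.nil_append, List.length_nil, Nat.cast_zero,
      Int.sub_zero, hdrop]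
    have hl : max 0 l = (((max 0 l).toNat : Nat) : Int) := by omega
    rw [hj, hl, PySem.List.slice_natCast_add, enumerate_take]
    simp
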